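-- pv_equiv track=rewrite | github.com/daniel880423/Member_System | file/hw2/1100342/s1100342_0.py | homework_2
-- ===== SOURCE A (Python) =====
-- def homework_2(lst): # 請同學記得把檔案名稱改成自己的學號(ex.1104813.py)
--     count =0#計算步數
--     pre = 0#記錄前一個值
--     for i in lst:
--         if i%2 != 0:#非偶數則加一
--             i+=1
--             count +=1
--
--         while i <=pre:#未大於前一個則加二
--             i+=2
--             count += 2
--         pre = i
--
--
--
--
--
--
--     return count
-- ===== SOURCE B (Python) =====
-- def homework_2(lst):
--     count = 0
--     pre = 0
--     for i in lst:
--         r = i % 2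
--         count += r
--         j = i + r
--         if j <= pre:
--             k = (pre - j) // 2 + 1
--             count += 2 * k
--             j += 2 * k
--         pre = j
--     return count
-- ===== Notes on version B (the rewrite author's own statement) =====
-- stated objective: faster
-- what changed: Replaced A's inner while-loop (adding 2 until the element exceeds the previous value) with the closed-form jump k = (pre - j)//2 + 1, so each element is handled in O(1).
import Mathlib
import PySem

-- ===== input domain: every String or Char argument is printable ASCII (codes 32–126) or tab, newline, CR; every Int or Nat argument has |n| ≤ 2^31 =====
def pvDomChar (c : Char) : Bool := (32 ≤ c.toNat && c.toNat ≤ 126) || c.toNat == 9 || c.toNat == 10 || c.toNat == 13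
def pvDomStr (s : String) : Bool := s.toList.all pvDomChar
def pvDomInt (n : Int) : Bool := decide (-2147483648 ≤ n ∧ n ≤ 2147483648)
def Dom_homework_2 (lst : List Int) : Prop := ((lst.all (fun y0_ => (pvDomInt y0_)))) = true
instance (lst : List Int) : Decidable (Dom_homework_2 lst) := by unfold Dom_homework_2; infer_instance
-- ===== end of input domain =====

-- ===== PORT A =====
-- B replaces A's inner while-loop with closed-form arithmetic (objective: faster, O(n*V) -> O(n)).
-- inner 'while i <= pre: i += 2; count += 2' of A, ported literally
def pvWhileA (i pre count : Int) : Int × Int :=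
  if i ≤ pre then pvWhileA (i + 2) pre (count + 2) else (i, count)
termination_by (pre + 2 - i).toNat
decreasing_by omega

def homework_2 (lst : List Int) : Int :=
  (lst.foldl
    (fun (s : Int × Int) (i : Int) =>
      -- s = (count, pre)
      let i1 := if PySem.Int.mod i 2 ≠ 0 then i + 1 else i
      let c1 := if PySem.Int.mod i 2 ≠ 0 then s.1 + 1 else s.1
      let r := pvWhileA i1 s.2 c1
      (r.2, r.1))
    (0, 0)).1

-- ===== PORT B =====
def homework_2_alt (lst : List Int) : Int :=
  (lst.foldl
    (fun (s : Int × Int) (i : Int) =>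
      -- s = (count, pre)
      let r := PySem.Int.mod i 2
      let c := s.1 + r
      let j := i + r
      if j ≤ s.2 then
        let k := PySem.Int.floordiv (s.2 - j) 2 + 1
        (c + 2 * k, j + 2 * k)
      else (c, j))
    (0, 0)).1

-- ===== PRECONDITION & SPEC =====
def Spec_homework_2 (lst : List Int) (out : Int) : Prop := out = homework_2_alt lst
instance (lst : List Int) (out : Int) : Decidable (Spec_homework_2 lst out) := by unfold Spec_homework_2; infer_instance

-- ===== CLAIM (what is proved, stated in full; the proofs are below) =====
def Claim_equal_homework_2 : Prop := ∀ (lst : List Int), Dom_homework_2 lst → Spec_homework_2 lst (homework_2 lst)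

-- ===== LEMMAS AND PROOFS =====

-- closed form of A's inner while loop
theorem pvWhileA_closed (i pre count : Int) :
    pvWhileA i pre count =
      if i ≤ pre then
        (i + 2 * (PySem.Int.floordiv (pre - i) 2 + 1),
         count + 2 * (PySem.Int.floordiv (pre - i) 2 + 1))
      else (i, count) := by
  rw [pvWhileA]
  split_ifs with h
  · rw [pvWhileA_closed (i + 2) pre (count + 2)]
    have h2 : PySem.Int.floordiv (pre - i) 2 = (pre - i) / 2 :=
      PySem.Int.floordiv_eq_ediv_of_pos (by omega)
    have h3 : PySem.Int.floordiv (pre - (i + 2)) 2 = (pre - (i + 2)) / 2 :=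
      PySem.Int.floordiv_eq_ediv_of_pos (by omega)
    split_ifs with h'
    · rw [h2, h3]; simp only [Prod.mk.injEq]; omega
    · rw [h2]; simp only [Prod.mk.injEq]; omega
  · rfl
termination_by (pre + 2 - i).toNat
decreasing_by omega

-- the two per-element step functions agree
theorem step_eq (s : Int × Int) (i : Int) :
    (let i1 := if PySem.Int.mod i 2 ≠ 0 then i + 1 else i
     let c1 := if PySem.Int.mod i 2 ≠ 0 then s.1 + 1 else s.1
     let r := pvWhileA i1 s.2 c1
     ((r.2, r.1) : Int × Int)) =
    (let r := PySem.Int.mod i 2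
     let c := s.1 + r
     let j := i + r
     if j ≤ s.2 then
       let k := PySem.Int.floordiv (s.2 - j) 2 + 1
       (c + 2 * k, j + 2 * k)
     else (c, j)) := by
  have h0 : 0 ≤ PySem.Int.mod i 2 := PySem.Int.mod_nonneg i (by omega)
  have h1 : PySem.Int.mod i 2 < 2 := PySem.Int.mod_lt i (by omega)
  simp only [pvWhileA_closed]
  rcases (by omega : PySem.Int.mod i 2 = 0 ∨ PySem.Int.mod i 2 = 1) with hz | hz <;>
    simp only [hz] <;> norm_num <;> split_ifs <;> simp_all

-- ===== VERDICT (by name: the statement is the Claim_ definition above) =====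
theorem homework_2_spec : Claim_equal_homework_2 := by
  intro lst _
  unfold Spec_homework_2 homework_2 homework_2_alt
  have hfun :
      (fun (s : Int × Int) (i : Int) =>
        let i1 := if PySem.Int.mod i 2 ≠ 0 then i + 1 else i
        let c1 := if PySem.Int.mod i 2 ≠ 0 then s.1 + 1 else s.1
        let r := pvWhileA i1 s.2 c1
        ((r.2, r.1) : Int × Int)) =
      (fun (s : Int × Int) (i : Int) =>
        let r := PySem.Int.mod i 2
        let c := s.1 + r
        let j := i + r
        if j ≤ s.2 then
          let k := PySem.Int.floordiv (s.2 - j) 2 + 1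
          (c + 2 * k, j + 2 * k)
        else (c, j)) := funext fun s => funext fun i => step_eq s i
  rw [hfun]
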